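-- pv_equiv track=rewrite | github.com/michalPradzynski/Python-exercises | one_line_calculator.py | get_calculation_order
-- ===== SOURCE A (Python) =====
-- def get_calculation_order(operators):
--     ordered_symbols = []
--
--     for index, symbol in enumerate(operators):
--         if symbol == "^":
--             ordered_symbols.append((0, index, symbol))
--         elif symbol == "*" or symbol == "/":
--             ordered_symbols.append((1, index, symbol))
--         else:
--             ordered_symbols.append((2, index, symbol))
--
--     ordered_symbols.sort(key=lambda order: order[0])
--
--     return ordered_symbols
-- ===== SOURCE B (Python) =====
-- def get_calculation_order(operators):
--     e = list(enumerate(operators))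
--     return ([(0, i, s) for i, s in e if s == "^"]
--             + [(1, i, s) for i, s in e if s == "*" or s == "/"]
--             + [(2, i, s) for i, s in e if not (s == "^" or s == "*" or s == "/")])
-- ===== Notes on version B (the rewrite author's own statement) =====
-- stated objective: alternative
-- what changed: Replaces the append-loop plus stable sort on the precedence key with three filtering comprehensions over the enumerated list, one per precedence level, concatenated in order -- no sort at all.
import Mathlib
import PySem

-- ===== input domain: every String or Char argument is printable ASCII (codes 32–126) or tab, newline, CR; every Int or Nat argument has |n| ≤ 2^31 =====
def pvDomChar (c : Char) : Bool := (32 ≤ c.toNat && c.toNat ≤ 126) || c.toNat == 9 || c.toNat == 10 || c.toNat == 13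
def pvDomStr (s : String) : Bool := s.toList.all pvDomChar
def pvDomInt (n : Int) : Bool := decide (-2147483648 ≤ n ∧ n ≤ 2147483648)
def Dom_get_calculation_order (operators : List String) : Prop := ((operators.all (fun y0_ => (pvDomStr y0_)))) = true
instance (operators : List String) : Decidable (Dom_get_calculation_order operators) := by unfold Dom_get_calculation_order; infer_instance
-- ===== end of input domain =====

-- B replaces A's append-loop + stable sort by three filtering comprehensions (one per precedence level) concatenated in order.

-- ===== PORT A =====
def get_calculation_order (operators : List String) : List (Int × Int × String) :=
  let ordered_symbols : List (Int × Int × String) :=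
    (PySem.List.enumerate operators).foldl
      (fun acc p =>
        if p.2 == "^" then acc ++ [((0 : Int), p.1, p.2)]
        else if p.2 == "*" || p.2 == "/" then acc ++ [((1 : Int), p.1, p.2)]
        else acc ++ [((2 : Int), p.1, p.2)]) []
  PySem.List.sorted ordered_symbols (fun order => order.1) false

-- ===== PORT B =====
def get_calculation_order_alt (operators : List String) : List (Int × Int × String) :=
  let e := PySem.List.enumerate operators
  ((e.filter (fun p => p.2 == "^")).map (fun p => ((0 : Int), p.1, p.2)))
    ++ ((e.filter (fun p => p.2 == "*" || p.2 == "/")).map (fun p => ((1 : Int), p.1, p.2)))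
    ++ ((e.filter (fun p => !(p.2 == "^" || p.2 == "*" || p.2 == "/"))).map (fun p => ((2 : Int), p.1, p.2)))

-- ===== PRECONDITION & SPEC =====
def Spec_get_calculation_order (operators : List String) (out : List (Int × Int × String)) : Prop := out = get_calculation_order_alt operators
instance (operators : List String) (out : List (Int × Int × String)) : Decidable (Spec_get_calculation_order operators out) := by unfold Spec_get_calculation_order; infer_instance

-- ===== CLAIM (what is proved, stated in full; the proofs are below) =====
def Claim_equal_get_calculation_order : Prop := ∀ (operators : List String), Dom_get_calculation_order operators → Spec_get_calculation_order operators (get_calculation_order operators)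

-- ===== LEMMAS AND PROOFS =====

-- ===== VERDICT (by name: the statement is the Claim_ definition above) =====
-- the tagging function A applies to each (index, symbol) pair
def pvTag (p : Int × String) : Int × Int × String :=
  (if p.2 == "^" then (0 : Int) else if p.2 == "*" || p.2 == "/" then 1 else 2, p.1, p.2)

theorem pvTag_fst_cases (p : Int × String) :
    (pvTag p).1 = 0 ∨ (pvTag p).1 = 1 ∨ (pvTag p).1 = 2 := by
  unfold pvTag; split_ifs <;> simp

-- A's build loop is the map of pvTag
theorem pvA_build (ws : List (Int × String)) :
    ws.foldl
      (fun acc p =>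
        if p.2 == "^" then acc ++ [((0 : Int), p.1, p.2)]
        else if p.2 == "*" || p.2 == "/" then acc ++ [((1 : Int), p.1, p.2)]
        else acc ++ [((2 : Int), p.1, p.2)]) [] = ws.map pvTag := by
  have h : (fun (acc : List (Int × Int × String)) (p : Int × String) =>
        if p.2 == "^" then acc ++ [((0 : Int), p.1, p.2)]
        else if p.2 == "*" || p.2 == "/" then acc ++ [((1 : Int), p.1, p.2)]
        else acc ++ [((2 : Int), p.1, p.2)])
      = (fun acc p => acc ++ [pvTag p]) := by
    funext acc p; unfold pvTag; split_ifs <;> rfl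
  rw [h, PySem.List.foldl_append_singleton_eq_map]; simp

-- filtering the tagged list by key k is mapping the tag over the matching symbols
theorem pvFilter0 (ws : List (Int × String)) :
    (ws.map pvTag).filter (fun e => e.1 == 0)
      = (ws.filter (fun p => p.2 == "^")).map (fun p => ((0 : Int), p.1, p.2)) := by
  induction ws with
  | nil => rfl
  | cons p t ih =>
    by_cases h1 : p.2 = "^"
    · simp [pvTag, h1, ih, Prod.ext_iff]
    · by_cases h2 : p.2 = "*"
      · simp [pvTag, h1, h2, ih, Prod.ext_iff]
      · by_cases h3 : p.2 = "/"
        · simp [pvTag, h1, h2, h3, ih, Prod.ext_iff]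
        · simp [pvTag, h1, h2, h3, ih, Prod.ext_iff]

theorem pvFilter1 (ws : List (Int × String)) :
    (ws.map pvTag).filter (fun e => e.1 == 1)
      = (ws.filter (fun p => p.2 == "*" || p.2 == "/")).map (fun p => ((1 : Int), p.1, p.2)) := by
  induction ws with
  | nil => rfl
  | cons p t ih =>
    by_cases h1 : p.2 = "^"
    · simp [pvTag, h1, ih, Prod.ext_iff]
    · by_cases h2 : p.2 = "*"
      · simp [pvTag, h1, h2, ih, Prod.ext_iff]
      · by_cases h3 : p.2 = "/"
        · simp [pvTag, h1, h2, h3, ih, Prod.ext_iff]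
        · simp [pvTag, h1, h2, h3, ih, Prod.ext_iff]

theorem pvFilter2 (ws : List (Int × String)) :
    (ws.map pvTag).filter (fun e => e.1 == 2)
      = (ws.filter (fun p => !(p.2 == "^" || p.2 == "*" || p.2 == "/"))).map (fun p => ((2 : Int), p.1, p.2)) := by
  induction ws with
  | nil => rfl
  | cons p t ih =>
    by_cases h1 : p.2 = "^"
    · simp [pvTag, h1, ih, Prod.ext_iff]
    · by_cases h2 : p.2 = "*"
      · simp [pvTag, h1, h2, ih, Prod.ext_iff]
      · by_cases h3 : p.2 = "/"
        · simp [pvTag, h1, h2, h3, ih, Prod.ext_iff]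
        · simp [pvTag, h1, h2, h3, ih, Prod.ext_iff]

-- inserting below means skipping a block of smaller keys
theorem pvInsertBy_append_not {α : Type} (before : α → α → Bool) (x : α)
    (ys zs : List α) (h : ∀ y ∈ ys, before x y = false) :
    PySem.List.insertBy before x (ys ++ zs) = ys ++ PySem.List.insertBy before x zs := by
  induction ys with
  | nil => rfl
  | cons y t ih =>
    have hy : before x y = false := h y (by simp)
    simp only [List.cons_append, PySem.List.insertBy, hy]
    simp only [Bool.false_eq_true, if_false]
    rw [ih (fun z hz => h z (by simp [hz]))]

-- insertion in front of a (possibly empty) all-greater list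
theorem pvInsertBy_front {α : Type} (before : α → α → Bool) (x : α)
    (zs : List α) (h : ∀ z ∈ zs, before x z = true) :
    PySem.List.insertBy before x zs = x :: zs := by
  cases zs with
  | nil => rfl
  | cons z t => simp [PySem.List.insertBy, h z (by simp)]

-- stable insertion sort of a 3-valued-key list is the concatenation of its key-filters
theorem pvSorted_three (ws : List (Int × Int × String))
    (h : ∀ e ∈ ws, e.1 = 0 ∨ e.1 = 1 ∨ e.1 = 2) :
    PySem.List.sorted ws (fun e => e.1) false
      = ws.filter (fun e => e.1 == 0) ++ ws.filter (fun e => e.1 == 1)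
          ++ ws.filter (fun e => e.1 == 2) := by
  rw [PySem.List.sorted_eq_foldl_insertBy]
  induction ws using List.reverseRecOn with
  | nil => rfl
  | append_singleton t x ih =>
    have ht : ∀ e ∈ t, e.1 = 0 ∨ e.1 = 1 ∨ e.1 = 2 := fun e he => h e (by simp [he])
    rw [List.foldl_append, List.foldl_cons, List.foldl_nil, ih ht]
    have hf0 : ∀ e ∈ t.filter (fun e => e.1 == 0), (e : Int × Int × String).1 = 0 := by
      intro e he; simpa using (List.of_mem_filter he)
    have hf1 : ∀ e ∈ t.filter (fun e => e.1 == 1), (e : Int × Int × String).1 = 1 := by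
      intro e he; simpa using (List.of_mem_filter he)
    have hf2 : ∀ e ∈ t.filter (fun e => e.1 == 2), (e : Int × Int × String).1 = 2 := by
      intro e he; simpa using (List.of_mem_filter he)
    rcases h x (by simp) with hx | hx | hx
    · rw [List.append_assoc,
          pvInsertBy_append_not _ _ _ _ (fun y hy => by simp [hf0 y hy, hx]),
          pvInsertBy_front _ _ _ ?_]
      · simp [List.filter_append, hx]
      · intro z hz
        rcases List.mem_append.mp hz with hz | hz
        · simp [hf1 z hz, hx]
        · simp [hf2 z hz, hx]
    · rw [pvInsertBy_append_not _ _ _ _ ?_, pvInsertBy_front _ _ _ (fun z hz => by simp [hf2 z hz, hx])]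
      · simp [List.filter_append, hx]
      · intro y hy
        rcases List.mem_append.mp hy with hy | hy
        · simp [hf0 y hy, hx]
        · simp [hf1 y hy, hx]
    · rw [PySem.List.insertBy_of_forall_not_before _ _ _ ?_]
      · simp [List.filter_append, hx]
      · intro y hy
        rcases List.mem_append.mp hy with hy | hy
        · rcases List.mem_append.mp hy with hy | hy
          · simp [hf0 y hy, hx]
          · simp [hf1 y hy, hx]
        · simp [hf2 y hy, hx]

theorem get_calculation_order_spec : Claim_equal_get_calculation_order := by
  intro operators _
  unfold Spec_get_calculation_order get_calculation_order get_calculation_order_alt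
  rw [pvA_build, pvSorted_three _ (by intro e he; rcases List.mem_map.mp he with ⟨p, _, rfl⟩; exact pvTag_fst_cases p)]
  rw [pvFilter0, pvFilter1, pvFilter2]
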